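-- pv_equiv track=rewrite | github.com/RedTachyon/coltra-rl | coltra/utils.py | split_ana
-- ===== SOURCE A (Python) =====
-- from typing import (
--     List,
--     Union,
--     Tuple,
--     Callable,
--     Optional,
--     Iterator,
--     Type,
-- )
--
-- def split_ana(content: str) -> List[str]:
--     """
--     Splits an .ana file into parts, each of which is a string that corresponds to some data batch.
--     """
--     outputs = []
--     temp = []
--     for line in content.split("\n"):
--         if len(line) > 0 and line[0] != " ":
--             outputs.append("\n".join(temp))
--             temp = [line]
--         else:
--             temp.append(line)
--
--     outputs.append("\n".join(temp))
--     return outputs[1:]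
-- ===== SOURCE B (Python) =====
-- from typing import List
--
--
-- def _body_line(line: str) -> bool:
--     return not line or line[0] == " "
--
--
-- def split_ana(content: str) -> List[str]:
--     """
--     Splits an .ana file into parts, each of which is a string that corresponds to some data batch.
--     """
--     lines = content.split("\n")
--     rest = lines
--     # skip everything before the first header line
--     while rest and _body_line(rest[0]):
--         rest = rest[1:]
--     sections = []
--     while rest:
--         head, rest = rest[0], rest[1:]
--         body = []
--         while rest and _body_line(rest[0]):
--             body.append(rest[0])
--             rest = rest[1:]
--         sections.append("\n".join([head] + body))
--     return sections
-- ===== Notes on version B (the rewrite author's own statement) =====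
-- stated objective: alternative
-- what changed: Instead of A's accumulate-and-flush fold that builds a dummy pre-header section and drops it with outputs[1:], B skips the prefix before the first header and then slices each header-led section out of the line list directly.
import Mathlib
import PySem

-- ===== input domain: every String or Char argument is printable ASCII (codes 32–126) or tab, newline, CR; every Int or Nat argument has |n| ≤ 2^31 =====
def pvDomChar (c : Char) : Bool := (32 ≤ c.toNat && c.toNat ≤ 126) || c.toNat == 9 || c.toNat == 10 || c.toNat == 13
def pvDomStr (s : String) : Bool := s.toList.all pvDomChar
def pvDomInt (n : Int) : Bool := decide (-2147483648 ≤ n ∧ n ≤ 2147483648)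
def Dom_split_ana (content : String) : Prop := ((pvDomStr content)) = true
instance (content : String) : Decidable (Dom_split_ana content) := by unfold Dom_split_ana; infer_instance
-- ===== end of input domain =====

-- B scans the line list with two cursors (skip the pre-header prefix, then cut each header-led
-- section out directly) instead of A's accumulate-and-flush fold that drops a dummy first section.

-- ===== PORT A =====
-- one loop step of A: flush temp into outputs on a header line, else extend temp
def splitAnaStep (st : List String × List String) (line : String) : List String × List String :=
  if 0 < PySem.Str.len line ∧ PySem.Str.pyGet? line 0 ≠ some ' ' then
    (st.1 ++ [PySem.Str.join "\n" st.2], [line])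
  else
    (st.1, st.2 ++ [line])

def split_ana (content : String) : List String :=
  -- content.split("\n"): the separator is the nonempty literal "\n", so split? is always `some`
  let st := ((PySem.Str.split? content "\n").getD []).foldl splitAnaStep ([], [])
  PySem.List.slice (st.1 ++ [PySem.Str.join "\n" st.2]) (some 1) none

-- ===== PORT B =====
-- _body_line from Source B
def bodyLine (line : String) : Bool :=
  PySem.Str.len line == 0 || PySem.Str.pyGet? line 0 == some ' '

-- termination fact for the outer loop, cited by splitAnaGo's decreasing_by
theorem dropWhile_lt_cons (p : String → Bool) (h : String) (rest : List String) :
    (rest.dropWhile p).length < (h :: rest).length := by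
  simp only [List.length_cons]
  exact Nat.lt_succ_of_le (List.length_dropWhile_le _ _)

-- the outer while-loop of Source B: head off a header, absorb the following body lines, recurse
def splitAnaGo : List String → List String
  | [] => []
  | h :: rest =>
      PySem.Str.join "\n" (h :: rest.takeWhile bodyLine) :: splitAnaGo (rest.dropWhile bodyLine)
  termination_by ls => ls.length
  decreasing_by exact dropWhile_lt_cons bodyLine h rest

def split_ana_alt (content : String) : List String :=
  splitAnaGo (((PySem.Str.split? content "\n").getD []).dropWhile bodyLine)

-- ===== PRECONDITION & SPEC =====
def Spec_split_ana (content : String) (out : List String) : Prop := out = split_ana_alt content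
instance (content : String) (out : List String) : Decidable (Spec_split_ana content out) := by unfold Spec_split_ana; infer_instance

-- ===== CLAIM (what is proved, stated in full; the proofs are below) =====
def Claim_equal_split_ana : Prop := ∀ (content : String), Dom_split_ana content → Spec_split_ana content (split_ana content)

-- ===== LEMMAS AND PROOFS =====

-- A's step on a body line extends temp
theorem step_body {l : String} (st : List String × List String) (hb : bodyLine l = true) :
    splitAnaStep st l = (st.1, st.2 ++ [l]) := by
  unfold splitAnaStep
  rw [if_neg]
  rw [bodyLine, Bool.or_eq_true, beq_iff_eq, beq_iff_eq] at hb
  rintro ⟨h1, h2⟩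
  rcases hb with h | h
  · rw [h] at h1; exact absurd h1 (by norm_num)
  · exact h2 h

-- A's step on a header line flushes temp
theorem step_header {l : String} (st : List String × List String) (hb : bodyLine l = false) :
    splitAnaStep st l = (st.1 ++ [PySem.Str.join "\n" st.2], [l]) := by
  unfold splitAnaStep
  rw [if_pos]
  rw [bodyLine, Bool.or_eq_false_iff, beq_eq_false_iff_ne, beq_eq_false_iff_ne] at hb
  obtain ⟨h1, h2⟩ := hb
  refine ⟨?_, h2⟩
  have hl := PySem.Str.len_eq l
  rw [hl] at h1 ⊢
  omega

-- abstract section list produced from an open accumulator t over the remaining lines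
def sectionsFrom (t : List String) : List String → List String
  | [] => [PySem.Str.join "\n" t]
  | l :: ls =>
      if bodyLine l then sectionsFrom (t ++ [l]) ls
      else PySem.Str.join "\n" t :: sectionsFrom [l] ls

-- A's fold, flushed at the end, is o ++ the abstract section list
theorem foldA_eq_sections (ls : List String) : ∀ (o t : List String),
    (ls.foldl splitAnaStep (o, t)).1 ++ [PySem.Str.join "\n" (ls.foldl splitAnaStep (o, t)).2]
      = o ++ sectionsFrom t ls := by
  induction ls with
  | nil => intro o t; simp [sectionsFrom]
  | cons l ls ih =>
      intro o t
      rcases hb : bodyLine l with _ | _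
      · rw [List.foldl_cons, step_header (o, t) hb, ih, sectionsFrom]
        simp [hb]
      · rw [List.foldl_cons, step_body (o, t) hb, ih, sectionsFrom]
        simp [hb]

-- the abstract section list is B's: first the open section, then splitAnaGo on the rest
theorem sections_eq_go (ls : List String) : ∀ (t : List String),
    sectionsFrom t ls
      = PySem.Str.join "\n" (t ++ ls.takeWhile bodyLine) :: splitAnaGo (ls.dropWhile bodyLine) := by
  induction ls with
  | nil => intro t; rw [splitAnaGo.eq_def]; simp [sectionsFrom]
  | cons l ls ih =>
      intro t
      rcases hb : bodyLine l with _ | _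
      · have hb' : ¬ bodyLine l = true := by simp [hb]
        rw [sectionsFrom, if_neg hb', List.takeWhile_cons_of_neg hb',
          List.dropWhile_cons_of_neg hb', splitAnaGo.eq_def, ih [l]]
        simp
      · rw [sectionsFrom, if_pos hb, List.takeWhile_cons_of_pos hb,
          List.dropWhile_cons_of_pos hb, ih (t ++ [l])]
        simp

-- ===== VERDICT (by name: the statement is the Claim_ definition above) =====
theorem split_ana_spec : Claim_equal_split_ana := by
  intro content _
  unfold Spec_split_ana
  simp only [split_ana, split_ana_alt]
  rw [foldA_eq_sections _ [] [], List.nil_append, sections_eq_go,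
    PySem.List.slice_from_one, List.tail_cons]
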